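-- pv_equiv track=rewrite | github.com/AdamZhouSE/pythonHomework | Code/CodeRecords/2857/60691/295690.py | function
-- ===== SOURCE A (Python) =====
-- def function(l, n):
--     num = []
--     for i in range(1, n+1):
--         boolean = True
--         for j in range(len(l)):
--             if l[j] % i != 0:
--                 boolean = False
--                 break
--         if boolean:
--             num.append(i)
--     return len(num)
-- ===== SOURCE B (Python) =====
-- def function(l, n):
--     # gcd of all elements once, then a single divisor-count pass: O(len(l)*log + n) vs A's O(n*len(l))
--     g = 0
--     for x in l:
--         a, b = g, abs(x)
--         while b:
--             a, b = b, a % b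
--         g = a
--     count = 0
--     for i in range(1, n + 1):
--         if g % i == 0:
--             count += 1
--     return count
-- ===== Notes on version B (the rewrite author's own statement) =====
-- stated objective: faster
-- what changed: B computes the gcd of the list once (Euclid) and counts i in 1..n dividing that gcd in a single pass, removing A's inner scan over the whole list for every i.
import Mathlib
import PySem

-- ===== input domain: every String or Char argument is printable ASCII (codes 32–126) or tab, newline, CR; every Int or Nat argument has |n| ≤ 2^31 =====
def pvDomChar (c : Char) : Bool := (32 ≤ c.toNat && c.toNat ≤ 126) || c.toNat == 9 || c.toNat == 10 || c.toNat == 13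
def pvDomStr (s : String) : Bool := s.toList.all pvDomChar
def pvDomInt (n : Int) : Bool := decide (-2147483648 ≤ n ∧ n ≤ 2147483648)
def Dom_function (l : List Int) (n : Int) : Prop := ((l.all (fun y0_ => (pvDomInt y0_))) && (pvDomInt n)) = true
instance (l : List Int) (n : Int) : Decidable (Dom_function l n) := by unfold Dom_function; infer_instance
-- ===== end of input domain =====

-- B computes the gcd of the list once and counts i in 1..n dividing it in one pass,
-- removing A's inner scan over the whole list for every i (objective: faster).

-- ===== PORT A =====
-- inner 'for j in range(len(l)): if l[j] % i != 0: boolean = False; break'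
-- ported as structural recursion over the elements (same visit order, same short-circuit)
def innerA (l : List Int) (i : Int) : Bool :=
  match l with
  | [] => true
  | x :: rest => if PySem.Int.mod x i ≠ 0 then false else innerA rest i

def function (l : List Int) (n : Int) : Int :=
  let num := (PySem.List.pyRange 1 (n + 1) 1).foldl
    (fun num i => if innerA l i then num ++ [i] else num) ([] : List Int)
  (num.length : Int)

-- ===== PORT B =====
-- 'a, b = g, abs(x); while b: a, b = b, a % b' (operands are nonnegative throughout)
def euclid (a b : Nat) : Nat :=
  if b = 0 then a else euclid b (a % b)
termination_by b
decreasing_by exact Nat.mod_lt _ (Nat.pos_of_ne_zero (by assumption))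

def function_alt (l : List Int) (n : Int) : Int :=
  let g : Nat := l.foldl (fun g x => euclid g x.natAbs) 0
  (PySem.List.pyRange 1 (n + 1) 1).foldl
    (fun count i => if PySem.Int.mod (g : Int) i = 0 then count + 1 else count) 0

-- ===== PRECONDITION & SPEC =====
def Spec_function (l : List Int) (n : Int) (out : Int) : Prop := out = function_alt l n
instance (l : List Int) (n : Int) (out : Int) : Decidable (Spec_function l n out) := by unfold Spec_function; infer_instance

-- ===== CLAIM (what is proved, stated in full; the proofs are below) =====
def Claim_equal_function : Prop := ∀ (l : List Int) (n : Int), Dom_function l n → Spec_function l n (function l n)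

-- ===== LEMMAS AND PROOFS =====

theorem euclid_eq_gcd (a b : Nat) : euclid a b = Nat.gcd a b := by
  induction b using Nat.strong_induction_on generalizing a with
  | _ b ih =>
    rw [euclid]
    by_cases hb : b = 0
    · simp [hb]
    · rw [if_neg hb, ih (a % b) (Nat.mod_lt _ (Nat.pos_of_ne_zero hb)) b]
      rw [Nat.gcd_comm b (a % b), ← Nat.gcd_rec, Nat.gcd_comm]

theorem natAbs_dvd_iff (i : Nat) (x : Int) : i ∣ x.natAbs ↔ (i : Int) ∣ x := by
  simpa using Int.natAbs_dvd_natAbs (a := (i : Int)) (b := x)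

theorem dvd_foldl_gcd (i : Nat) (l : List Int) :
    ∀ g0 : Nat, (i ∣ l.foldl (fun g x => euclid g x.natAbs) g0 ↔
      i ∣ g0 ∧ ∀ x ∈ l, (i : Int) ∣ x) := by
  induction l with
  | nil => intro g0; simp
  | cons x t ih =>
    intro g0
    rw [List.foldl_cons, euclid_eq_gcd, ih, Nat.dvd_gcd_iff, natAbs_dvd_iff]
    simp only [List.forall_mem_cons]
    tauto

theorem innerA_iff (l : List Int) (i : Int) :
    innerA l i = true ↔ ∀ x ∈ l, i ∣ x := by
  induction l with
  | nil => simp [innerA]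
  | cons x t ih =>
    rw [innerA]
    by_cases h : PySem.Int.mod x i = 0
    · rw [if_neg (by simpa using h)]
      simp [ih, (PySem.Int.mod_eq_zero_iff_dvd x i).1 h]
    · rw [if_pos h]
      simp only [Bool.false_eq_true, false_iff]
      intro hall
      exact h ((PySem.Int.mod_eq_zero_iff_dvd x i).2 (hall x (List.mem_cons_self)))

-- ===== VERDICT (by name: the statement is the Claim_ definition above) =====
theorem function_spec : Claim_equal_function := by
  intro l n _
  unfold Spec_function function function_alt
  rw [PySem.List.foldl_append_if_eq_filter, PySem.List.foldl_ite_add_one]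
  simp only [List.nil_append, zero_add]
  rw [← List.countP_eq_length_filter]
  congr 1
  apply List.countP_congr
  intro i hi
  have h1 : (1 : Int) ≤ i := (PySem.List.mem_pyRange_one.mp hi).1
  have hiabs : ((i.natAbs : Nat) : Int) = i := Int.natAbs_of_nonneg (by omega)
  rw [decide_eq_true_iff, innerA_iff, PySem.Int.mod_eq_zero_iff_dvd]
  rw [show (i ∣ ((l.foldl (fun g x => euclid g x.natAbs) 0 : Nat) : Int)) ↔
        i.natAbs ∣ l.foldl (fun g x => euclid g x.natAbs) 0 from by
      rw [← hiabs]; exact_mod_cast Int.natCast_dvd_natCast]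
  rw [dvd_foldl_gcd]
  simp [hiabs]
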